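-- pv_equiv track=rewrite | github.com/Fonntyy/AlgorithmsExam | midterm/mountain_sort.py | mount_sort
-- ===== SOURCE A (Python) =====
-- def mount_sort(A):
--     # if the array has only zero or one element than it returns the array itself
--     if len(A) < 2:
--         return A
--     # it uses the insertion sort to sort the elements first in the increasing order
--     for i in range(1, len(A)):
--         j = i
--         while j > 0 and A[j] < A[j - 1]:
--             A[j], A[j - 1] = A[j - 1], A[j]
--             j = j - 1
--     # it reverses the second half of the array
--     i = len(A) // 2
--     j = len(A) - 1
--     while i < j:
--         A[i], A[j] = A[j], A[i]
--         i = i + 1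
--         j = j - 1
--     return A
-- ===== SOURCE B (Python) =====
-- def mount_sort(A):
--     if len(A) < 2:
--         return A
--     s = sorted(A)
--     h = len(s) // 2
--     A[:] = s[:h] + s[h:][::-1]
--     return A
-- ===== Notes on version B (the rewrite author's own statement) =====
-- stated objective: faster
-- what changed: Replaces the in-place O(n^2) swap-based insertion sort plus two-pointer second-half reversal with sorted() (O(n log n)) followed by slice concatenation (prefix + reversed suffix) written back with A[:] = ...
import Mathlib
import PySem

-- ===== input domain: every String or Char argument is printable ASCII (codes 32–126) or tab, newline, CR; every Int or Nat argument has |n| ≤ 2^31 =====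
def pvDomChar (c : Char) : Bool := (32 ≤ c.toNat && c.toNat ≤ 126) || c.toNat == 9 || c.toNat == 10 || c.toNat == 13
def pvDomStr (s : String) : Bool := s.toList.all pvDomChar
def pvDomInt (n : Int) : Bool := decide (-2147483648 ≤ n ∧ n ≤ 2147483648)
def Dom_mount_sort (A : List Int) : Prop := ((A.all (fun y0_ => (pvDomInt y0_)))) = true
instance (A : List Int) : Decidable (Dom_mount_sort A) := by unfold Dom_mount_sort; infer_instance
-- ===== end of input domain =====

-- B replaces A's in-place insertion sort + two-pointer reversal with sorted() plus slice
-- concatenation (asymptotically faster sort); both mutate the argument list in Python and the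
-- equivalence proved here is about the RETURN value (which equals the final list contents in both).

-- ===== PORT A =====
-- Python's simultaneous swap `A[p], A[q] = A[q], A[p]`; every call below uses indices that are
-- provably in range (0 ≤ q < p < len A), so `getD`/`set` are exact for it.
def pvSwap (l : List Int) (p q : Nat) : List Int :=
  (l.set p (l.getD q 0)).set q (l.getD p 0)

-- the inner `while j > 0 and A[j] < A[j-1]` loop
def pvBubble (l : List Int) (j : Nat) : List Int :=
  if h : 0 < j ∧ l.getD j 0 < l.getD (j - 1) 0 then
    pvBubble (pvSwap l j (j - 1)) (j - 1)
  else l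
termination_by j
decreasing_by omega

-- the `while i < j` reversal loop (`A[i], A[j] = A[j], A[i]; i += 1; j -= 1`)
def pvRevLoop (l : List Int) (i j : Nat) : List Int :=
  if h : i < j then
    pvRevLoop (pvSwap l i j) (i + 1) (j - 1)
  else l
termination_by j - i
decreasing_by omega

def mount_sort (A : List Int) : List Int :=
  if A.length < 2 then A
  else
    -- `for i in range(1, len(A)): ...` (range(1, n) = List.range' 1 (n-1))
    let l := (List.range' 1 (A.length - 1)).foldl pvBubble A
    -- `i = len(A) // 2; j = len(A) - 1; while i < j: ...` (the loops preserve the length)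
    pvRevLoop l (A.length / 2) (A.length - 1)

-- ===== PORT B =====
def mount_sort_alt (A : List Int) : List Int :=
  if A.length < 2 then A
  else
    let s := PySem.List.sorted A (fun x => x) false      -- s = sorted(A)
    let h : Nat := s.length / 2                          -- h = len(s) // 2 (length is a Nat)
    -- s[:h] + s[h:][::-1]  (step -1 ≠ 0, so slice? is always `some`)
    PySem.List.slice s none (some (h : Int)) ++
      ((PySem.List.slice? (PySem.List.slice s (some (h : Int)) none) none none (-1)).getD [])

-- ===== PRECONDITION & SPEC =====
def Spec_mount_sort (A : List Int) (out : List Int) : Prop := out = mount_sort_alt A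
instance (A : List Int) (out : List Int) : Decidable (Spec_mount_sort A out) := by unfold Spec_mount_sort; infer_instance

-- ===== CLAIM (what is proved, stated in full; the proofs are below) =====
def Claim_equal_mount_sort : Prop := ∀ (A : List Int), Dom_mount_sort A → Spec_mount_sort A (mount_sort A)

-- ===== LEMMAS AND PROOFS =====

-- getD / set at the junction of an append
theorem pvGetD_append (u : List Int) (a : Int) (t : List Int) :
    (u ++ a :: t).getD u.length 0 = a := by
  induction u with
  | nil => rfl
  | cons x u ih => simpa using ih

theorem pvSet_append (u : List Int) (a : Int) (t : List Int) (b : Int) :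
    (u ++ a :: t).set u.length b = u ++ b :: t := by
  induction u with
  | nil => rfl
  | cons x u ih => simpa using ih

-- unfolding equations for PySem.List.insertBy
theorem pvInsertBy_nil (before : Int → Int → Bool) (x : Int) :
    PySem.List.insertBy before x [] = [x] := by simp [PySem.List.insertBy]

theorem pvInsertBy_cons (before : Int → Int → Bool) (x y : Int) (ys : List Int) :
    PySem.List.insertBy before x (y :: ys) =
      (if before x y then x :: y :: ys else y :: PySem.List.insertBy before x ys) := by
  simp [PySem.List.insertBy]

theorem pvInsertBy_append_last (x a : Int) (s : List Int) (hxa : x < a) :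
    PySem.List.insertBy (fun p q => decide (p < q)) x (s ++ [a]) =
      PySem.List.insertBy (fun p q => decide (p < q)) x s ++ [a] := by
  induction s with
  | nil => simp [pvInsertBy_nil, pvInsertBy_cons, hxa]
  | cons y s ih =>
      by_cases hxy : x < y <;> simp [pvInsertBy_cons, hxy, ih]

theorem pvInsertBy_last_of_ge (x : Int) (s : List Int) (h : ∀ y ∈ s, ¬ x < y) :
    PySem.List.insertBy (fun p q => decide (p < q)) x s = s ++ [x] := by
  induction s with
  | nil => simp [pvInsertBy_nil]
  | cons y s ih =>
      have hy : ¬ x < y := h y (by simp)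
      simp [pvInsertBy_cons, hy, ih fun z hz => h z (by simp [hz])]

-- the inner bubble loop inserts the element at position |s| into the sorted prefix s
theorem pvBubble_spec (s : List Int) (x : Int) (rest : List Int)
    (hs : s.Pairwise (· ≤ ·)) :
    pvBubble (s ++ x :: rest) s.length =
      PySem.List.insertBy (fun p q => decide (p < q)) x s ++ rest := by
  induction s using List.reverseRecOn generalizing x rest with
  | nil => rw [pvBubble]; simp [pvInsertBy_nil]
  | append_singleton s' a ih =>
      have hlen : (s' ++ [a]).length = s'.length + 1 := by simp
      have hgx : ((s' ++ [a]) ++ x :: rest).getD (s'.length + 1) 0 = x := by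
        simpa [hlen] using pvGetD_append (s' ++ [a]) x rest
      have hga : ((s' ++ [a]) ++ x :: rest).getD s'.length 0 = a := by
        simpa using pvGetD_append s' a (x :: rest)
      by_cases hxa : x < a
      · -- swap a and x, then recurse at j-1
        have hswap : pvSwap ((s' ++ [a]) ++ x :: rest) (s'.length + 1) s'.length
            = s' ++ x :: a :: rest := by
          unfold pvSwap
          rw [hga, hgx]
          have h1 : ((s' ++ [a]) ++ x :: rest).set (s'.length + 1) a
              = (s' ++ [a]) ++ a :: rest := by
            simpa [hlen] using pvSet_append (s' ++ [a]) x rest a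
          rw [h1]
          simpa using pvSet_append s' a (a :: rest) x
        rw [pvBubble]
        simp only [hlen]
        rw [dif_pos (by simp only [Nat.add_sub_cancel]; exact ⟨Nat.succ_pos _, by rw [hgx, hga]; exact hxa⟩)]
        simp only [Nat.add_sub_cancel]
        rw [hswap]
        have hs' : s'.Pairwise (· ≤ ·) := (List.pairwise_append.mp hs).1
        rw [ih x (a :: rest) hs']
        rw [pvInsertBy_append_last x a s' hxa]
        simp
      · -- a ≤ x: the loop stops immediately; x belongs at the end of s
        rw [pvBubble]
        simp only [hlen]
        rw [dif_neg (by simp only [Nat.add_sub_cancel]; intro hcon; exact hxa (by rw [hgx, hga] at hcon; exact hcon.2))]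
        have hall : ∀ y ∈ s' ++ [a], ¬ x < y := by
          intro y hy
          rcases List.mem_append.mp hy with hy' | hy'
          · have hya : y ≤ a := by
              have := List.pairwise_append.mp hs
              exact this.2.2 y hy' a (by simp)
            omega
          · simp at hy'; omega
        rw [pvInsertBy_last_of_ge x (s' ++ [a]) hall]
        simp

-- abbreviation for the stable-insertion characterisation of sorted
theorem pvSorted_eq_foldl (xs : List Int) :
    PySem.List.sorted xs (fun x => x) false =
      xs.foldl (fun acc x => PySem.List.insertBy (fun p q => decide (p < q)) x acc) [] :=
  PySem.List.sorted_eq_foldl_insertBy xs _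

-- the outer loop invariant: after the first m iterations the prefix of length 1+m is sorted
theorem pvOuter_inv (A : List Int) (m : Nat) (hm : 1 + m ≤ A.length) :
    (List.range' 1 m).foldl pvBubble A =
      PySem.List.sorted (A.take (1 + m)) (fun x => x) false ++ A.drop (1 + m) := by
  induction m with
  | zero =>
      cases A with
      | nil => simp at hm
      | cons a t =>
          simp [pvSorted_eq_foldl, pvInsertBy_nil, List.foldl]
  | succ m ih =>
      have hm' : 1 + m ≤ A.length := by omega
      have hidx : 1 + m < A.length := by omega
      have hdrop : A.drop (1 + m) = A[1 + m] :: A.drop (1 + m + 1) :=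
        List.drop_eq_getElem_cons hidx
      have htake : A.take (1 + m + 1) = A.take (1 + m) ++ [A[1 + m]] :=
        List.take_succ_eq_append_getElem hidx
      have hslen : (PySem.List.sorted (A.take (1 + m)) (fun x => x) false).length = 1 + m := by
        rw [PySem.List.length_sorted]
        simp [List.length_take, Nat.min_eq_left hm']
      have hpw : (PySem.List.sorted (A.take (1 + m)) (fun x => x) false).Pairwise (· ≤ ·) := by
        simpa using PySem.List.sorted_pairwise (A.take (1 + m)) (fun x => x)
      have hbub := pvBubble_spec (PySem.List.sorted (A.take (1 + m)) (fun x => x) false)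
        A[1 + m] (A.drop (1 + m + 1)) hpw
      rw [hslen] at hbub
      generalize hg : A[1 + m] = v at hdrop htake hbub
      rw [List.range'_concat, List.foldl_append, ih hm']
      simp only [List.foldl_cons, List.foldl_nil, Nat.one_mul]
      rw [hdrop, hbub]
      rw [show (1 : Nat) + (m + 1) = 1 + m + 1 from by omega]
      congr 1
      rw [pvSorted_eq_foldl, pvSorted_eq_foldl, htake, List.foldl_append]
      simp

-- the reversal loop reverses the segment [i, j] (stated via an append decomposition)
theorem pvRevLoop_spec (n : Nat) : ∀ (mid a b : List Int), mid.length = n →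
    pvRevLoop (a ++ mid ++ b) a.length (a.length + mid.length - 1) =
      a ++ mid.reverse ++ b := by
  induction n using Nat.strong_induction_on with
  | _ n ih =>
    intro mid a b hlen
    rcases mid with _ | ⟨x, _ | ⟨y0, t⟩⟩
    · rw [pvRevLoop]
      rw [dif_neg (by simp only [List.length_nil, Nat.add_zero]; omega)]
      simp
    · rw [pvRevLoop]
      rw [dif_neg (by simp)]
      simp
    · obtain ⟨m', y, hmy⟩ : ∃ m' y, y0 :: t = m' ++ [y] := by
        rcases List.eq_nil_or_concat' (y0 :: t) with h | ⟨m', y, h⟩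
        · simp at h
        · exact ⟨m', y, h⟩
      rw [hmy]
      have hnval : m'.length + 2 = n := by
        have h2 := congrArg List.length hmy
        simp at h2
        simp at hlen
        omega
      have hj : a.length + (x :: (m' ++ [y])).length - 1 = a.length + m'.length + 1 := by
        simp
        omega
      have hassoc : a ++ (x :: (m' ++ [y])) ++ b = a ++ x :: (m' ++ y :: b) := by simp
      have hgi : (a ++ x :: (m' ++ y :: b)).getD a.length 0 = x :=
        pvGetD_append a x (m' ++ y :: b)
      have hgj : (a ++ x :: (m' ++ y :: b)).getD (a.length + m'.length + 1) 0 = y := by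
        have h2 : a ++ x :: (m' ++ y :: b) = (a ++ x :: m') ++ y :: b := by simp
        have h3 : (a ++ x :: m').length = a.length + m'.length + 1 := by simp; omega
        rw [h2, ← h3]
        exact pvGetD_append (a ++ x :: m') y b
      have hswap : pvSwap (a ++ x :: (m' ++ y :: b)) a.length (a.length + m'.length + 1)
          = a ++ y :: (m' ++ x :: b) := by
        unfold pvSwap
        rw [hgi, hgj]
        have h1 : (a ++ x :: (m' ++ y :: b)).set a.length y = a ++ y :: (m' ++ y :: b) :=
          pvSet_append a x (m' ++ y :: b) y
        rw [h1]
        have h2 : a ++ y :: (m' ++ y :: b) = (a ++ y :: m') ++ y :: b := by simp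
        have h3 : (a ++ y :: m').length = a.length + m'.length + 1 := by simp; omega
        rw [h2, ← h3, pvSet_append (a ++ y :: m') y b x]
        simp
      rw [hassoc, hj, pvRevLoop]
      rw [dif_pos (by omega)]
      rw [hswap]
      have hre : a ++ y :: (m' ++ x :: b) = (a ++ [y]) ++ m' ++ (x :: b) := by simp
      have hlen' : a.length + 1 = (a ++ [y]).length := by simp
      have hj' : a.length + m'.length + 1 - 1 = (a ++ [y]).length + m'.length - 1 := by
        simp
      rw [hre, hlen', hj']
      have hm'n : m'.length < n := by omega
      rw [ih m'.length hm'n m' (a ++ [y]) (x :: b) rfl]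
      simp

-- ===== VERDICT helper: full characterisation of port A =====
theorem pvMount_sort_eq (A : List Int) (h : ¬ A.length < 2) :
    mount_sort A =
      (PySem.List.sorted A (fun x => x) false).take (A.length / 2) ++
      ((PySem.List.sorted A (fun x => x) false).drop (A.length / 2)).reverse := by
  have hn : 2 ≤ A.length := by omega
  unfold mount_sort
  rw [if_neg h]
  have houter : (List.range' 1 (A.length - 1)).foldl pvBubble A =
      PySem.List.sorted A (fun x => x) false := by
    have := pvOuter_inv A (A.length - 1) (by omega)
    rw [show 1 + (A.length - 1) = A.length from by omega] at this
    simpa using this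
  rw [houter]
  set s := PySem.List.sorted A (fun x => x) false with hs
  have hslen : s.length = A.length := PySem.List.length_sorted A _ _
  have hdecomp : s = s.take (A.length / 2) ++ s.drop (A.length / 2) ++ [] := by simp
  have htlen : (s.take (A.length / 2)).length = A.length / 2 := by
    rw [List.length_take, hslen]; omega
  have hdlen : (s.drop (A.length / 2)).length = A.length - A.length / 2 := by
    rw [List.length_drop, hslen]
  have hjj : (s.take (A.length / 2)).length + (s.drop (A.length / 2)).length - 1
      = A.length - 1 := by rw [htlen, hdlen]; omega
  have hrev := pvRevLoop_spec (s.drop (A.length / 2)).length (s.drop (A.length / 2))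
    (s.take (A.length / 2)) [] rfl
  rw [htlen, hdlen] at hrev
  rw [show A.length / 2 + (A.length - A.length / 2) - 1 = A.length - 1 from by omega] at hrev
  conv_lhs => rw [hdecomp]
  rw [hrev]
  simp

theorem pvMount_sort_alt_eq (A : List Int) (h : ¬ A.length < 2) :
    mount_sort_alt A =
      (PySem.List.sorted A (fun x => x) false).take (A.length / 2) ++
      ((PySem.List.sorted A (fun x => x) false).drop (A.length / 2)).reverse := by
  have hslen : (PySem.List.sorted A (fun x => x) false).length = A.length :=
    PySem.List.length_sorted A _ _
  unfold mount_sort_alt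
  rw [if_neg h]
  simp only [hslen]
  rw [PySem.List.slice_to_natCast, PySem.List.slice_from_natCast,
      PySem.List.slice?_none_none_neg_one]
  simp

-- ===== VERDICT (by name: the statement is the Claim_ definition above) =====
theorem mount_sort_spec : Claim_equal_mount_sort := by
  intro A _
  unfold Spec_mount_sort
  by_cases h : A.length < 2
  · unfold mount_sort mount_sort_alt
    rw [if_pos h, if_pos h]
  · rw [pvMount_sort_eq A h, pvMount_sort_alt_eq A h]
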